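-- pv_equiv track=rewrite | github.com/ayoubzulfiqar/Leeteration | MaximumEnemyFortsThatCanBeCaptured/maximum_enemy_forts_that_can_be_captured.py | max_enemy_forts_captured
-- ===== SOURCE A (Python) =====
-- def max_enemy_forts_captured(forts: list[int]) -> int:
--     max_captured = 0
--     current_zero_count = 0
--     last_fort_type = 0
--
--     for fort_val in forts:
--         if fort_val == 0:
--             if last_fort_type != 0:
--                 current_zero_count += 1
--         else:
--             if last_fort_type == 0:
--                 last_fort_type = fort_val
--                 current_zero_count = 0
--             elif fort_val == last_fort_type:
--                 current_zero_count = 0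
--             else:
--                 max_captured = max(max_captured, current_zero_count)
--                 last_fort_type = fort_val
--                 current_zero_count = 0
--
--     return max_captured
-- ===== SOURCE B (Python) =====
-- def max_enemy_forts_captured(forts: list[int]) -> int:
--     nz = [(i, v) for i, v in enumerate(forts) if v != 0]
--     best = 0
--     for (i, u), (j, w) in zip(nz, nz[1:]):
--         if u != w:
--             best = max(best, j - i - 1)
--     return best
-- ===== Notes on version B (the rewrite author's own statement) =====
-- stated objective: alternative
-- what changed: Replaced A's single-pass three-variable state machine with a two-phase decomposition: collect the (index, value) pairs of non-zero forts, then take the maximum gap over consecutive pairs with different values.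
import Mathlib
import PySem

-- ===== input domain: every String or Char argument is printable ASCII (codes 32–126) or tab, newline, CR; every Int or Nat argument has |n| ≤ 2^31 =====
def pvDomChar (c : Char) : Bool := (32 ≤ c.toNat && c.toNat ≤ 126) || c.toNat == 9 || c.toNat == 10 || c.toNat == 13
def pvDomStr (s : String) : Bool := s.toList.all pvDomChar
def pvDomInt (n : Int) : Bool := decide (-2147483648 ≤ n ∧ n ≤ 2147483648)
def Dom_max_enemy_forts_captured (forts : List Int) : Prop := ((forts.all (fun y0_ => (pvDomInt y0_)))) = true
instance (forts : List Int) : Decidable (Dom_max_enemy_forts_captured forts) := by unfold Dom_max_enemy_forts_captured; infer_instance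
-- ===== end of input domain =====

-- B replaces A's single-pass three-variable state machine by a two-phase decomposition:
-- collect the (index, value) pairs of the non-zero forts, then take the maximum gap over
-- consecutive pairs with different values (objective: simpler/alternative, same cost).

-- ===== PORT A =====
def max_enemy_forts_captured (forts : List Int) : Int :=
  (forts.foldl
    (fun (s : Int × Int × Int) fort_val =>
      let m := s.1; let c := s.2.1; let l := s.2.2
      if fort_val = 0 then
        if l ≠ 0 then (m, c + 1, l) else (m, c, l)
      else
        if l = 0 then (m, 0, fort_val)
        else if fort_val = l then (m, 0, l)
        else (max m c, 0, fort_val))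
    (0, 0, 0)).1

-- ===== PORT B =====
def max_enemy_forts_captured_alt (forts : List Int) : Int :=
  let nz := (PySem.List.enumerate forts).filter (fun p => p.2 ≠ 0)
  (nz.zip nz.tail).foldl
    (fun best pq => if pq.1.2 ≠ pq.2.2 then max best (pq.2.1 - pq.1.1 - 1) else best) 0

-- ===== PRECONDITION & SPEC =====
def Spec_max_enemy_forts_captured (forts : List Int) (out : Int) : Prop := out = max_enemy_forts_captured_alt forts
instance (forts : List Int) (out : Int) : Decidable (Spec_max_enemy_forts_captured forts out) := by unfold Spec_max_enemy_forts_captured; infer_instance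

-- ===== CLAIM (what is proved, stated in full; the proofs are below) =====
def Claim_equal_max_enemy_forts_captured : Prop := ∀ (forts : List Int), Dom_max_enemy_forts_captured forts → Spec_max_enemy_forts_captured forts (max_enemy_forts_captured forts)

-- ===== LEMMAS AND PROOFS =====

-- A's loop body, named for the proofs.
def pvStepA (s : Int × Int × Int) (fort_val : Int) : Int × Int × Int :=
  let m := s.1; let c := s.2.1; let l := s.2.2
  if fort_val = 0 then
    if l ≠ 0 then (m, c + 1, l) else (m, c, l)
  else
    if l = 0 then (m, 0, fort_val)
    else if fort_val = l then (m, 0, l)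
    else (max m c, 0, fort_val)

-- Structural form of B's fold over adjacent pairs.
def pvPairs (best : Int) : List (Int × Int) → Int
  | a :: b :: t => pvPairs (if a.2 ≠ b.2 then max best (b.1 - a.1 - 1) else best) (b :: t)
  | _ => best

theorem pvPairs_eq_zip (ys : List (Int × Int)) (best : Int) :
    (ys.zip ys.tail).foldl
      (fun best pq => if pq.1.2 ≠ pq.2.2 then max best (pq.2.1 - pq.1.1 - 1) else best) best
    = pvPairs best ys := by
  induction ys generalizing best with
  | nil => rfl
  | cons a t ih =>
    cases t with
    | nil => rfl
    | cons b u =>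
      simp only [List.tail_cons, List.zip_cons_cons, List.foldl_cons, pvPairs]
      exact ih _

-- the non-zero (index, value) pairs of xs, indexed from k
def pvNz (k : Int) : List Int → List (Int × Int)
  | [] => []
  | x :: xs => if x = 0 then pvNz (k + 1) xs else (k, x) :: pvNz (k + 1) xs

theorem pvNz_eq_filter (xs : List Int) (k : Int) :
    ((PySem.List.enumerate xs k).filter (fun p => p.2 ≠ 0)) = pvNz k xs := by
  induction xs generalizing k with
  | nil => simp [PySem.List.enumerate_nil, pvNz]
  | cons x xs ih =>
    rw [PySem.List.enumerate_cons, List.filter_cons, ih]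
    by_cases hx : x = 0
    · rw [if_neg (by simp [hx]), pvNz, if_pos hx]
    · rw [if_pos (by simp [hx]), pvNz, if_neg hx]

-- Main invariant: A's fold from state (m, c, l) equals B's pair scan over the
-- pending fort (last non-zero value l at index k - c - 1, if any) followed by
-- the remaining non-zero forts.
theorem pvInvariant (xs : List Int) (k m c l : Int) :
    (xs.foldl pvStepA (m, c, l)).1
      = pvPairs m ((if l = 0 then [] else [(k - c - 1, l)]) ++ pvNz k xs) := by
  induction xs generalizing k m c l with
  | nil =>
    by_cases hl : l = 0 <;> simp [hl, pvNz, pvPairs]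
  | cons x xs ih =>
    rw [List.foldl_cons]
    by_cases hx : x = 0
    · by_cases hl : l = 0
      · have hs : pvStepA (m, c, l) x = (m, c, l) := by simp [pvStepA, hx, hl]
        rw [hs, ih (k + 1) m c l, pvNz, if_pos hx, if_pos hl, if_pos hl]
      · have hs : pvStepA (m, c, l) x = (m, c + 1, l) := by simp [pvStepA, hx, hl]
        have e : k + 1 - (c + 1) - 1 = k - c - 1 := by ring
        rw [hs, ih (k + 1) m (c + 1) l, pvNz, if_pos hx, if_neg hl, if_neg hl, e]
    · by_cases hl : l = 0
      · have hs : pvStepA (m, c, l) x = (m, 0, x) := by simp [pvStepA, hx, hl]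
        have e : k + 1 - 0 - 1 = k := by ring
        rw [hs, ih (k + 1) m 0 x, pvNz, if_neg hx, if_pos hl, if_neg hx, e,
          List.nil_append, List.singleton_append]
      · by_cases heq : x = l
        · subst heq
          have hs : pvStepA (m, c, x) x = (m, 0, x) := by simp [pvStepA, hx]
          have e : k + 1 - 0 - 1 = k := by ring
          rw [hs, ih (k + 1) m 0 x, pvNz, if_neg hx, if_neg hl, if_neg hx, e,
            List.singleton_append, List.singleton_append]
          conv_rhs => rw [pvPairs]
          simp
        · have hs : pvStepA (m, c, l) x = (max m c, 0, x) := by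
            simp [pvStepA, hx, hl, heq]
          have e : k + 1 - 0 - 1 = k := by ring
          have e2 : k - (k - c - 1) - 1 = c := by ring
          rw [hs, ih (k + 1) (max m c) 0 x, pvNz, if_neg hx, if_neg hl, if_neg hx, e,
            List.singleton_append, List.singleton_append]
          conv_rhs => rw [pvPairs]
          rw [if_pos (fun h => heq ((show x = l from h.symm)))]
          simp [e2]

-- ===== VERDICT (by name: the statement is the Claim_ definition above) =====
theorem max_enemy_forts_captured_spec : Claim_equal_max_enemy_forts_captured := by
  intro forts _
  show max_enemy_forts_captured forts = max_enemy_forts_captured_alt forts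
  have hA : max_enemy_forts_captured forts = (forts.foldl pvStepA (0, 0, 0)).1 := rfl
  rw [hA, pvInvariant forts 0 0 0 0, if_pos rfl, List.nil_append]
  simp only [max_enemy_forts_captured_alt]
  rw [pvNz_eq_filter, pvPairs_eq_zip]
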